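-- pv_equiv track=rewrite | github.com/CcQunResearch/YoGGa | ConstructDataset/utils.py | remove_subwords
-- ===== SOURCE A (Python) =====
-- def remove_subwords(word_list):
--     result = []
--     for i, word in enumerate(word_list):
--         is_substring = False
--         for j, other_word in enumerate(word_list):
--             if i != j and word in other_word:
--                 is_substring = True
--                 break
--         if not is_substring:
--             result.append(word)
--     return result
-- ===== SOURCE B (Python) =====
-- def remove_subwords(word_list):
--     cnt = {}
--     for w in word_list:
--         cnt[w] = cnt.get(w, 0) + 1
--     keep = {}
--     for w in cnt:
--         keep[w] = cnt[w] == 1 and not any(w in u for u in cnt if u != w)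
--     return [w for w in word_list if keep[w]]
-- ===== Notes on version B (the rewrite author's own statement) =====
-- stated objective: alternative
-- what changed: A runs the full index-pair nested scan for every list element; B builds a duplicate counter over the distinct words once, computes one kept/dominated verdict per distinct word (duplicates are dominated by their other copy, unique words by a strictly different containing word), and filters the list by that table, so each repeated word is decided once instead of once per occurrence.
import Mathlib
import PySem

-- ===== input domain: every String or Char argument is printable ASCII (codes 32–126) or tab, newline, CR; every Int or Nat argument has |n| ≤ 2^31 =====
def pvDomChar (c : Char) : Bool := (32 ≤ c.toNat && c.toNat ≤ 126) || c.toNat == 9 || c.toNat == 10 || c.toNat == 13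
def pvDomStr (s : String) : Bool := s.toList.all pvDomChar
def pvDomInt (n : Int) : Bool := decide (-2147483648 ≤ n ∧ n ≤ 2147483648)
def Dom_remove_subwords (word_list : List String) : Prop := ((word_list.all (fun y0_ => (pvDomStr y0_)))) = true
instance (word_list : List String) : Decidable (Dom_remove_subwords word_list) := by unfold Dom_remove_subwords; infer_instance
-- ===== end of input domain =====

-- B replaces A's per-index nested scan by a duplicate counter over the DISTINCT words plus one
-- dominated/kept verdict per distinct word, reused by every occurrence (objective: alternative).

-- ===== PORT A =====
def remove_subwords (word_list : List String) : List String :=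
  (PySem.List.enumerate word_list).foldl
    (fun result p =>
      let is_substring :=
        (PySem.List.enumerate word_list).any
          (fun q => decide (p.1 ≠ q.1) && PySem.Str.isIn p.2 q.2)
      if !is_substring then result ++ [p.2] else result)
    []

-- ===== PORT B =====
def remove_subwords_alt (word_list : List String) : List String :=
  let cnt : PySem.Dict String Int :=
    word_list.foldl (fun d w => d.insert w (d.getD w 0 + 1)) PySem.Dict.empty
  let keep : PySem.Dict String Bool :=
    cnt.keys.foldl
      (fun kd w =>
        kd.insert w (decide (cnt.getD w 0 = 1) &&
          !(cnt.keys.any (fun u => decide (u ≠ w) && PySem.Str.isIn w u))))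
      PySem.Dict.empty
  -- Python's keep[w] cannot raise (every w of word_list is a key of keep); getD is its total form
  word_list.filter (fun w => keep.getD w false)

-- ===== PRECONDITION & SPEC =====
def Spec_remove_subwords (word_list : List String) (out : List String) : Prop := out = remove_subwords_alt word_list
instance (word_list : List String) (out : List String) : Decidable (Spec_remove_subwords word_list out) := by unfold Spec_remove_subwords; infer_instance

-- ===== CLAIM (what is proved, stated in full; the proofs are below) =====
def Claim_equal_remove_subwords : Prop := ∀ (word_list : List String), Dom_remove_subwords word_list → Spec_remove_subwords word_list (remove_subwords word_list)

-- ===== LEMMAS AND PROOFS =====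

-- B's counter loop counts occurrences
theorem pv_cntfold_getD (l : List String) (d : PySem.Dict String Int) (v : String) :
    (l.foldl (fun d w => d.insert w (d.getD w 0 + 1)) d).getD v 0
      = d.getD v 0 + (List.count v l : Int) := by
  induction l generalizing d with
  | nil => simp
  | cons w t ih =>
    simp only [List.foldl_cons, ih, PySem.Dict.getD_insert, List.count_cons]
    by_cases h : v = w
    · simp [h]; ring
    · simp [h, Ne.symm h]

-- B's counter loop collects the distinct words, in first-occurrence order
theorem pv_cntfold_keys (l : List String) (d : PySem.Dict String Int) :
    (l.foldl (fun d w => d.insert w (d.getD w 0 + 1)) d).keys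
      = l.foldl PySem.Set.add d.keys := by
  induction l generalizing d with
  | nil => rfl
  | cons w t ih =>
    simp only [List.foldl_cons, ih]
    congr 1
    by_cases h : d.contains w
    · rw [PySem.Dict.keys_insert_of_contains d _ h, PySem.Set.add]
      simp [PySem.Set.contains, (PySem.Dict.contains_iff_mem_keys d w).mp h]
    · rw [PySem.Dict.keys_insert_of_not_contains d _ (by simpa using h), PySem.Set.add]
      have : w ∉ d.keys := fun hm => h ((PySem.Dict.contains_iff_mem_keys d w).mpr hm)
      simp [PySem.Set.contains, this]

-- B's keep loop inserts distinct fresh keys, so it tabulates its value function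
theorem pv_keepdict_getD (ks : List String) (g : String → Bool) (hnd : ks.Nodup)
    {w : String} (hw : w ∈ ks) :
    ((ks.foldl (fun kd w => kd.insert w (g w)) PySem.Dict.empty).getD w false) = g w := by
  have hitems : (ks.foldl (fun kd w => kd.insert w (g w)) PySem.Dict.empty).items
      = ks.map (fun a => (a, g a)) := by
    simpa using PySem.Dict.items_foldl_insert_fresh ks (fun w => w) g PySem.Dict.empty
      (fun a _ => PySem.Dict.contains_empty a) (by simpa using hnd)
  have hkeys : (ks.foldl (fun kd w => kd.insert w (g w)) PySem.Dict.empty).keys = ks := by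
    simp [PySem.Dict.keys, hitems, Function.comp_def]
  have hmem : (w, g w) ∈ (ks.foldl (fun kd w => kd.insert w (g w)) PySem.Dict.empty).items := by
    rw [hitems]
    exact List.mem_map_of_mem hw
  have := PySem.Dict.get?_of_mem_items _ hmem (by rw [hkeys]; exact hnd)
  rw [PySem.Dict.getD_eq_get?_getD, this]; rfl

theorem pv_isIn_self (w : String) : PySem.Str.isIn w w = true :=
  (PySem.Str.isIn_iff_infix w w).mpr (List.infix_refl _)

-- membership in the list with index i removed = existence at an index ≠ i
theorem pv_mem_eraseIdx_iff (wl : List String) (i : Nat) (hi : i < wl.length) (u : String) :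
    u ∈ wl.take i ++ wl.drop (i + 1) ↔ ∃ k, ∃ h : k < wl.length, k ≠ i ∧ wl[k] = u := by
  rw [List.mem_append]
  constructor
  · rintro (h | h)
    · obtain ⟨k, hk, he⟩ := List.mem_iff_getElem.mp h
      simp only [List.length_take] at hk
      exact ⟨k, by omega, by omega, by rw [← he]; simp [List.getElem_take]⟩
    · obtain ⟨k, hk, he⟩ := List.mem_iff_getElem.mp h
      simp only [List.length_drop] at hk
      exact ⟨i + 1 + k, by omega, by omega, by rw [← he]; simp [List.getElem_drop]⟩
  · rintro ⟨k, hk, hne, he⟩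
    rcases Nat.lt_or_ge k i with h | h
    · left
      exact List.mem_iff_getElem.mpr ⟨k, by simp; omega, by simpa [List.getElem_take] using he⟩
    · right
      refine List.mem_iff_getElem.mpr ⟨k - (i + 1), by simp; omega, ?_⟩
      rw [List.getElem_drop]
      have hke : i + 1 + (k - (i + 1)) = k := by omega
      simp_rw [hke]; exact he

theorem pv_count_split (wl : List String) (i : Nat) (hi : i < wl.length) :
    List.count wl[i] wl = List.count wl[i] (wl.take i ++ wl.drop (i + 1)) + 1 := by
  set w := wl[i] with hw
  have hsplit : wl = wl.take i ++ w :: wl.drop (i + 1) := by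
    conv_lhs => rw [← List.take_append_drop i wl]
    rw [List.drop_eq_getElem_cons hi]
  conv_lhs => rw [hsplit]
  simp [List.count_append]
  omega

-- A's per-index containment test ↔ B's value-level verdict
theorem pv_core (wl : List String) (i : Nat) (hi : i < wl.length) :
    (∃ k, ∃ h : k < wl.length, k ≠ i ∧ PySem.Str.isIn wl[i] wl[k] = true)
      ↔ (List.count wl[i] wl ≠ 1 ∨ ∃ u ∈ wl, u ≠ wl[i] ∧ PySem.Str.isIn wl[i] u = true) := by
  set w := wl[i] with hw
  have hcnt : List.count w wl ≠ 1 ↔ w ∈ wl.take i ++ wl.drop (i + 1) := by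
    rw [pv_count_split wl i hi, ← hw]
    rw [← List.count_pos_iff]
    omega
  constructor
  · rintro ⟨k, hk, hne, hin⟩
    by_cases heq : wl[k] = w
    · left
      rw [hcnt, pv_mem_eraseIdx_iff wl i hi]
      exact ⟨k, hk, hne, heq⟩
    · right
      exact ⟨wl[k], List.getElem_mem hk, heq, hin⟩
  · rintro (h | ⟨u, hu, hne, hin⟩)
    · rw [hcnt, pv_mem_eraseIdx_iff wl i hi] at h
      obtain ⟨k, hk, hne, he⟩ := h
      exact ⟨k, hk, hne, by rw [he]; exact pv_isIn_self w⟩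
    · obtain ⟨k, hk, he⟩ := List.mem_iff_getElem.mp hu
      refine ⟨k, hk, ?_, by rw [he]; exact hin⟩
      intro hki
      subst hki
      exact hne (he.symm.trans hw.symm)

-- ===== VERDICT (by name: the statement is the Claim_ definition above) =====
theorem remove_subwords_spec : Claim_equal_remove_subwords := by
  intro wl _
  unfold Spec_remove_subwords remove_subwords remove_subwords_alt
  set cnt : PySem.Dict String Int :=
    wl.foldl (fun d w => d.insert w (d.getD w 0 + 1)) PySem.Dict.empty with hcntdef
  set g : String → Bool := fun w =>
    decide (cnt.getD w 0 = 1) &&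
      !(cnt.keys.any (fun u => decide (u ≠ w) && PySem.Str.isIn w u)) with hgdef
  set keep : PySem.Dict String Bool :=
    cnt.keys.foldl (fun kd w => kd.insert w (g w)) PySem.Dict.empty with hkeepdef
  have hK : cnt.keys = PySem.Set.ofList wl := by
    rw [hcntdef, pv_cntfold_keys, PySem.Dict.keys_empty, ← PySem.Set.ofList_eq_foldl]
  have hndK : cnt.keys.Nodup := by rw [hK]; exact PySem.Set.nodup_ofList wl
  have hc : ∀ v, cnt.getD v 0 = (List.count v wl : Int) := by
    intro v
    rw [hcntdef, pv_cntfold_getD, PySem.Dict.getD_empty]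
    ring
  have hkeep : ∀ w ∈ wl, keep.getD w false = g w := by
    intro w hwmem
    exact pv_keepdict_getD cnt.keys g hndK (by rw [hK]; exact (PySem.Set.mem_ofList wl w).mpr hwmem)
  rw [PySem.List.foldl_append_if
      (fun p : Int × String =>
        !((PySem.List.enumerate wl).any
          (fun q => decide (p.1 ≠ q.1) && PySem.Str.isIn p.2 q.2)))
      (fun p : Int × String => p.2)]
  rw [List.nil_append]
  conv_rhs => rw [← PySem.List.map_snd_enumerate wl 0]
  rw [List.filter_map]
  congr 1
  apply List.filter_congr
  intro x hx
  obtain ⟨k, hk, hxe⟩ := (PySem.List.mem_enumerate_iff wl 0 x).mp hx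
  subst hxe
  rw [Function.comp, hkeep wl[k] (List.getElem_mem hk), hgdef]
  have hLprop : ((PySem.List.enumerate wl).any
        (fun q => decide ((0:Int) + (k:Int) ≠ q.1) && PySem.Str.isIn wl[k] q.2)) = true
      ↔ (∃ k', ∃ h : k' < wl.length, k' ≠ k ∧ PySem.Str.isIn wl[k] wl[k'] = true) := by
    rw [List.any_eq_true]
    constructor
    · rintro ⟨q, hq, hpq⟩
      obtain ⟨k', hk', hqe⟩ := (PySem.List.mem_enumerate_iff wl 0 q).mp hq
      subst hqe
      simp only [Bool.and_eq_true, decide_eq_true_eq] at hpq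
      refine ⟨k', hk', ?_, hpq.2⟩
      intro he
      exact hpq.1 (by rw [he])
    · rintro ⟨k', hk', hne, hin⟩
      refine ⟨(0 + (k' : Int), wl[k']), (PySem.List.mem_enumerate_iff wl 0 _).mpr ⟨k', hk', rfl⟩, ?_⟩
      simp only [Bool.and_eq_true, decide_eq_true_eq, hin, and_true]
      intro he
      exact hne (by omega)
  have hRprop : (cnt.keys.any (fun u => decide (u ≠ wl[k]) && PySem.Str.isIn wl[k] u)) = true
      ↔ (∃ u ∈ wl, u ≠ wl[k] ∧ PySem.Str.isIn wl[k] u = true) := by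
    rw [List.any_eq_true]
    constructor
    · rintro ⟨u, hu, hpu⟩
      simp only [Bool.and_eq_true, decide_eq_true_eq] at hpu
      exact ⟨u, by rw [hK] at hu; exact (PySem.Set.mem_ofList wl u).mp hu, hpu.1, hpu.2⟩
    · rintro ⟨u, hu, hne, hin⟩
      exact ⟨u, by rw [hK]; exact (PySem.Set.mem_ofList wl u).mpr hu,
        by simp only [Bool.and_eq_true, decide_eq_true_eq]; exact ⟨hne, hin⟩⟩
  apply Bool.eq_iff_iff.mpr
  simp only [Bool.not_eq_true', Bool.and_eq_true, decide_eq_true_eq]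
  rw [Bool.eq_false_iff, Bool.eq_false_iff]
  rw [ne_eq, ne_eq, hLprop, hRprop, pv_core wl k hk]
  push Not
  constructor
  · rintro ⟨h1, h2⟩
    exact ⟨by rw [hc]; exact_mod_cast h1, h2⟩
  · rintro ⟨h1, h2⟩
    refine ⟨?_, h2⟩
    rw [hc] at h1
    exact_mod_cast h1
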